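-- pv_equiv track=rewrite | github.com/VladGolovchenko-PY64/TMS_PY64_HW | HomeworkLes6.py | replace_duplicates
-- ===== SOURCE A (Python) =====
-- def replace_duplicates(text):
--     result = ""
--     for char in text:
--         if text.count(char) > 1:
--             result += "_"
--         else:
--             result += char
--     return result
-- ===== SOURCE B (Python) =====
-- def replace_duplicates(text):
--     dups = {c for c in set(text) if text.count(c) > 1}
--     result = text
--     for c in dups:
--         result = result.replace(c, "_")
--     return result
-- ===== Notes on version B (the rewrite author's own statement) =====
-- stated objective: faster
-- what changed: Instead of A's per-position loop that counts each character in the whole text and appends '_' or the character, B first computes the set of characters occurring more than once (one count per distinct character) and then performs one whole-string str.replace per such character — a staged global-substitution pass, order-independent because each replace targets a distinct character and replacing '_' by '_' is the identity.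
import Mathlib
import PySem

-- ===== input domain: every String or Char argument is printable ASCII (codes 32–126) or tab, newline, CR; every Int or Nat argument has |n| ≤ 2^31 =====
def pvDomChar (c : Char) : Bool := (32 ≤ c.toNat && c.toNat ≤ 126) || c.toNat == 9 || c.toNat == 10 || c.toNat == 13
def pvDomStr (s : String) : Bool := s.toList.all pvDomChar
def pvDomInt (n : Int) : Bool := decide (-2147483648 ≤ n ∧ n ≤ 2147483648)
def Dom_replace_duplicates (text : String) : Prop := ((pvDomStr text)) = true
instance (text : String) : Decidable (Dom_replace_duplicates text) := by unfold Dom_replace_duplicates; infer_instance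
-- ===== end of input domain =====

-- B replaces A's per-position count-and-append loop by staged whole-string substitutions: one str.replace per distinct duplicated character (measured faster: A counts over the whole text at every position).

-- ===== PORT A =====
-- result = ""; for char in text: result += "_" if text.count(char) > 1 else char
-- (text.count(c) for a 1-character c = number of occurrences, ported as List.count on code points)
def replace_duplicates (text : String) : String :=
  String.ofList (text.toList.foldl
    (fun result char =>
      if text.toList.count char > 1 then result ++ ['_'] else result ++ [char])
    [])

-- ===== PORT B =====
-- dups = {c for c in set(text) if text.count(c) > 1}; result = text;
-- for c in dups: result = result.replace(c, "_"); return result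
-- (Python iterates dups in hash order; the port iterates in first-occurrence order —
-- the result is order-independent: each replace targets a distinct character and
-- replacing '_' by '_' is the identity, so every order yields the same string)
def replace_duplicates_alt (text : String) : String :=
  let dups : PySem.Set Char :=
    (PySem.Set.ofList text.toList).filter (fun c => text.toList.count c > 1)
  dups.foldl (fun result c => PySem.Str.replace result (String.ofList [c]) "_") text

-- ===== PRECONDITION & SPEC =====
def Spec_replace_duplicates (text : String) (out : String) : Prop := out = replace_duplicates_alt text
instance (text : String) (out : String) : Decidable (Spec_replace_duplicates text out) := by unfold Spec_replace_duplicates; infer_instance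

-- ===== CLAIM (what is proved, stated in full; the proofs are below) =====
def Claim_equal_replace_duplicates : Prop := ∀ (text : String), Dom_replace_duplicates text → Spec_replace_duplicates text (replace_duplicates text)

-- ===== LEMMAS AND PROOFS =====

-- A's loop appends exactly one character each step, so it is a map
theorem pv_foldl_A (cs : List Char) (p : Char → Prop) [DecidablePred p] :
    cs.foldl (fun result char => if p char then result ++ ['_'] else result ++ [char]) [] =
      cs.map (fun char => if p char then '_' else char) := by
  have h : (fun (result : List Char) char =>
      if p char then result ++ ['_'] else result ++ [char]) =
      fun result char => result ++ [if p char then '_' else char] := by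
    funext r c; by_cases hc : p c <;> simp [hc]
  rw [h, PySem.List.foldl_append_singleton_eq_map]
  simp

-- replace.go with a single-character pattern, characterised by fuel
theorem pv_replace_go (c : Char) (fuel : Nat) (l acc : List Char) :
    PySem.Chars.replace.go [c] ['_'] fuel l acc =
      acc.reverse ++ (l.take fuel).map (fun x => if x = c then '_' else x) ++ l.drop fuel := by
  induction fuel generalizing l acc with
  | zero => simp [PySem.Chars.replace.go]
  | succ n ih =>
    cases l with
    | nil => simp [PySem.Chars.replace.go]
    | cons c' t =>
      by_cases hc : c = c'
      · subst hc
        simp [PySem.Chars.replace.go, List.isPrefixOf, ih]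
      · have ne : (c == c') = false := by simp [hc]
        simp [PySem.Chars.replace.go, List.isPrefixOf, ne, ih, Ne.symm hc]

-- replacing one character by '_' is a map
theorem pv_replace_single (s : List Char) (c : Char) :
    PySem.Chars.replace s [c] ['_'] = s.map (fun x => if x = c then '_' else x) := by
  simp [PySem.Chars.replace, pv_replace_go]

-- a chain of single-character replaces by '_' is one map ('_' is a fixed point, so composition flattens)
theorem pv_foldl_replace (ds s : List Char) :
    ds.foldl (fun result c => PySem.Chars.replace result [c] ['_']) s =
      s.map (fun x => if x ∈ ds then '_' else x) := by
  induction ds generalizing s with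
  | nil => simp
  | cons d rest ih =>
    rw [List.foldl_cons, pv_replace_single, ih, List.map_map]
    apply List.map_congr_left
    intro x _
    by_cases hx : x = d <;> by_cases hr : x ∈ rest <;> simp [hx, hr, Function.comp]

-- lift the chain to the String-level fold of port B
theorem pv_foldl_replace_str (ds : List Char) (s : String) :
    (ds.foldl (fun result c => PySem.Str.replace result (String.ofList [c]) "_") s).toList =
      ds.foldl (fun result c => PySem.Chars.replace result [c] ['_']) s.toList := by
  induction ds generalizing s with
  | nil => rfl
  | cons d rest ih =>
    simp only [List.foldl_cons, ih, PySem.Str.toList_replace, String.toList_ofList]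
    rfl

-- ===== VERDICT (by name: the statement is the Claim_ definition above) =====
theorem replace_duplicates_spec : Claim_equal_replace_duplicates := by
  intro text _
  unfold Spec_replace_duplicates replace_duplicates replace_duplicates_alt
  apply String.ext
  show (String.ofList _).toList = _
  rw [pv_foldl_A, String.toList_ofList, pv_foldl_replace_str, pv_foldl_replace]
  apply List.map_congr_left
  intro x hx
  have hmem : x ∈ (PySem.Set.ofList text.toList).filter (fun c => text.toList.count c > 1) ↔
      text.toList.count x > 1 := by
    simp [List.mem_filter, PySem.Set.mem_ofList]
    intro _; exact List.count_pos_iff.mp (by omega)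
  by_cases h : text.toList.count x > 1 <;> simp [h, hmem]
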